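-- pv_equiv track=rewrite | github.com/dreamtides/dreamtides | scripts/utility/strip_commit_messages.py | strip_message
-- ===== SOURCE A (Python) =====
-- def strip_message(message):
--     """Remove lines containing 'Generated with' or 'Co-Authored-By' from message."""
--     lines = message.split("\n")
--     filtered_lines = []
--
--     for line in lines:
--         stripped = line.strip()
--         # Skip lines containing 'Generated with' or starting with 'Co-Authored-By:'
--         if "Generated with" in line or stripped.startswith("Co-Authored-By:"):
--             continue
--         filtered_lines.append(line)
--
--     # Remove trailing empty lines
--     while filtered_lines and not filtered_lines[-1].strip():
--         filtered_lines.pop()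
--
--     return "\n".join(filtered_lines)
-- ===== SOURCE B (Python) =====
-- def strip_message(message):
--     """Remove lines containing 'Generated with' or 'Co-Authored-By' from message."""
--     out = []
--     seen = False
--     for line in reversed(message.split("\n")):
--         s = line.strip()
--         if "Generated with" in line or s.startswith("Co-Authored-By:"):
--             continue
--         if not seen and s == "":
--             continue
--         seen = True
--         out.append(line)
--     return "\n".join(reversed(out))
-- ===== Notes on version B (the rewrite author's own statement) =====
-- stated objective: alternative
-- what changed: Single reverse-order pass with a content_seen flag replaces A's forward filter pass followed by a separate pop-trailing-blanks while loop.
import Mathlib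
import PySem

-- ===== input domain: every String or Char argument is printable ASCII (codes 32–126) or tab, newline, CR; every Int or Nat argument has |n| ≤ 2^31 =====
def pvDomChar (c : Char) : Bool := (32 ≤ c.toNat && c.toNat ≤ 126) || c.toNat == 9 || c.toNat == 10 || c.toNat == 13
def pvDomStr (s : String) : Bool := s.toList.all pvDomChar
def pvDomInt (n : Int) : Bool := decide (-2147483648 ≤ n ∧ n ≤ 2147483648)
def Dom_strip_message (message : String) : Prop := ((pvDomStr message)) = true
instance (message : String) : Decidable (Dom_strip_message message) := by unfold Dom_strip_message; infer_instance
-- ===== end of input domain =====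

-- B replaces A's forward filter pass + separate pop-trailing-blanks loop by one reverse pass
-- with a content_seen flag (objective: alternative decomposition, same cost).

-- shared helper: the skip condition both Pythons test verbatim
def skipLine (line : String) : Bool :=
  PySem.Str.isIn "Generated with" line ||
    PySem.Str.startswith (PySem.Str.strip line) "Co-Authored-By:"

-- ===== PORT A =====
-- the `while filtered_lines and not filtered_lines[-1].strip(): filtered_lines.pop()` loop
def popTrailing (l : List String) : List String :=
  if h : l = [] then l
  else if PySem.Str.strip (l.getLast h) == "" then popTrailing l.dropLast
  else l
termination_by l.length
decreasing_by
  have : 0 < l.length := List.length_pos_of_ne_nil h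
  simp [List.length_dropLast]; omega

def strip_message (message : String) : String :=
  let lines := (PySem.Str.split? message "\n").getD []
  let filtered := lines.foldl (fun acc line => if skipLine line then acc else acc ++ [line]) []
  PySem.Str.join "\n" (popTrailing filtered)

-- ===== PORT B =====
-- one step of B's loop over the reversed lines: state = (content_seen, collected lines)
def bStep (st : Bool × List String) (line : String) : Bool × List String :=
  if skipLine line then st
  else if !st.1 && (PySem.Str.strip line == "") then st
  else (true, st.2 ++ [line])

def strip_message_alt (message : String) : String :=
  let lines := (PySem.Str.split? message "\n").getD []
  let st := lines.reverse.foldl bStep (false, [])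
  PySem.Str.join "\n" st.2.reverse

-- ===== PRECONDITION & SPEC =====
def Spec_strip_message (message : String) (out : String) : Prop := out = strip_message_alt message
instance (message : String) (out : String) : Decidable (Spec_strip_message message out) := by unfold Spec_strip_message; infer_instance

-- ===== CLAIM (what is proved, stated in full; the proofs are below) =====
def Claim_equal_strip_message : Prop := ∀ (message : String), Dom_strip_message message → Spec_strip_message message (strip_message message)

-- ===== LEMMAS AND PROOFS =====

theorem foldl_keep (l acc : List String) :
    l.foldl (fun acc line => if skipLine line then acc else acc ++ [line]) acc
      = acc ++ l.filter (fun x => !skipLine x) := by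
  induction l generalizing acc with
  | nil => simp
  | cons h t ih =>
    by_cases hs : skipLine h <;> simp [hs, ih]

theorem bStep_true (l out : List String) :
    l.foldl bStep (true, out) = (true, out ++ l.filter (fun x => !skipLine x)) := by
  induction l generalizing out with
  | nil => simp
  | cons h t ih =>
    by_cases hs : skipLine h <;> simp [List.foldl_cons, bStep, hs, ih]

theorem bStep_false (l : List String) :
    (l.foldl bStep (false, [])).2
      = (l.filter (fun x => !skipLine x)).dropWhile (fun x => PySem.Str.strip x == "") := by
  induction l with
  | nil => simp
  | cons h t ih =>
    by_cases hs : skipLine h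
    · simp [List.foldl_cons, bStep, hs, ih]
    · by_cases hb : PySem.Str.strip h == ""
      · simp [List.foldl_cons, bStep, hs, hb, ih]
      · simp [List.foldl_cons, bStep, hs, hb, bStep_true]

theorem popTrailing_eq (l : List String) :
    popTrailing l = ((l.reverse.dropWhile (fun x => PySem.Str.strip x == ""))).reverse := by
  induction l using List.reverseRecOn with
  | nil => simp [popTrailing]
  | append_singleton l x ih =>
    rw [popTrailing]
    by_cases hb : PySem.Str.strip x == "" <;>
      simp [hb, ih]

-- ===== VERDICT (by name: the statement is the Claim_ definition above) =====
theorem strip_message_spec : Claim_equal_strip_message := by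
  intro message _
  unfold Spec_strip_message strip_message strip_message_alt
  dsimp only
  rw [foldl_keep, bStep_false, popTrailing_eq, List.filter_reverse]
  simp
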